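-- pv_equiv track=rewrite | github.com/NVIDIA/Megatron-LM | megatron/core/transformer/cuda_graphs.py | convert_schedule_table_to_order
-- ===== SOURCE A (Python) =====
-- def convert_schedule_table_to_order(num_warmup_microbatches, num_model_chunks, schedule_table):
--     """Convert a tunable schedule lookup table to the te.make_graphed_callables() accepted
--     order format. For example, the tunable schedule table for PP2 N3M5 with VP2 is as below:
--     virtual_microbatch_id | 0 1 2 3 4 5 6 7 8 9
--     microbatch_id         | 0 1 2 0 1 2 3 4 3 4
--     model_chunk_id        | 0 0 0 1 1 1 0 0 1 1
--
--     Then the forward backward separated order is: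
--     forward               | 1 1 1 2 2 2 1 1 2 2
--     backward              | -2 -2 -2 -1 -1 -1 -2 -2 -1 -1
--
--     If num_warmup_microbatches is 5, the output order is:
--     1 1 1 2 2 2 -2 1 -2 1 -2 2 -1 2 -1 -1 -2 -2 -1 -1
--     """
--     _, model_chunk_id_table = zip(*schedule_table)
--     forward_order = [chunk_id + 1 for chunk_id in model_chunk_id_table]
--     backward_order = [chunk_id - num_model_chunks for chunk_id in model_chunk_id_table]
--     order = forward_order[:num_warmup_microbatches]
--     for i in range(num_warmup_microbatches, len(forward_order)):
--         order.append(forward_order[i])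
--         order.append(backward_order[i - num_warmup_microbatches])
--     if num_warmup_microbatches > 0:
--         order.extend(backward_order[-num_warmup_microbatches:])
--     return order
-- ===== SOURCE B (Python) =====
-- def convert_schedule_table_to_order(num_warmup_microbatches, num_model_chunks, schedule_table):
--     """Single streaming pass with a FIFO delay line: each chunk id emits its forward
--     entry immediately and enqueues its backward entry, which is released once the
--     queue grows past num_warmup_microbatches; leftover backward entries drain at
--     the end. No slicing, no index arithmetic, no precomputed orders."""
--     order = []
--     pending = []
--     for _, chunk_id in schedule_table:
--         order.append(chunk_id + 1)
--         pending.append(chunk_id - num_model_chunks)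
--         if len(pending) > num_warmup_microbatches:
--             order.append(pending.pop(0))
--     order.extend(pending)
--     return order
-- ===== Notes on version B (the rewrite author's own statement) =====
-- stated objective: alternative
-- what changed: B replaces A's precomputed forward/backward lists with slicing and index arithmetic by a single streaming pass that uses a FIFO delay-line queue: each chunk id emits its forward entry and enqueues its backward entry, which is released once the queue exceeds num_warmup_microbatches, with the queue drained at the end.
import Mathlib
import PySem

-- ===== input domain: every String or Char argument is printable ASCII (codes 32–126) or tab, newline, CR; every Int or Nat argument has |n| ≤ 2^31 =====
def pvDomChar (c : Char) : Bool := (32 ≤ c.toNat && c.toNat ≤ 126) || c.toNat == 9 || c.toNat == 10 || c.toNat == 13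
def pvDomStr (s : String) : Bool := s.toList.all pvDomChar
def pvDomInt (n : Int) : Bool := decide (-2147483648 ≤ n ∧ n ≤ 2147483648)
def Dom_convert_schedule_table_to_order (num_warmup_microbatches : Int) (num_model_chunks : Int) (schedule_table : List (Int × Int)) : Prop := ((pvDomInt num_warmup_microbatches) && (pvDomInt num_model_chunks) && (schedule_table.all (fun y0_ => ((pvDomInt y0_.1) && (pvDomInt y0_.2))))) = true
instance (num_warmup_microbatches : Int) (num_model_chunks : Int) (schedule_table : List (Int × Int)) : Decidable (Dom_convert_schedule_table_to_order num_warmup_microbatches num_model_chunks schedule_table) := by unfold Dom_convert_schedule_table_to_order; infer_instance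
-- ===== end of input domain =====

-- B replaces A's precomputed forward/backward lists, slicing and index arithmetic by a
-- single streaming pass with a FIFO delay-line queue (objective: alternative algorithm).

-- ===== PORT A =====
-- `zip(*schedule_table)` raises ValueError on an empty table; Pre_ excludes that input,
-- so on admitted inputs it is exactly the projection to the second components.
def convert_schedule_table_to_order (num_warmup_microbatches : Int) (num_model_chunks : Int) (schedule_table : List (Int × Int)) : List Int :=
  let model_chunk_id_table := schedule_table.map (·.2)
  let forward_order := model_chunk_id_table.map (fun chunk_id => chunk_id + 1)
  let backward_order := model_chunk_id_table.map (fun chunk_id => chunk_id - num_model_chunks)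
  let order := PySem.List.slice forward_order none (some num_warmup_microbatches)
  let order := (PySem.List.pyRange num_warmup_microbatches (forward_order.length : Int) 1).foldl
    (fun acc i => acc ++ [PySem.List.pyGetD forward_order i 0]
                      ++ [PySem.List.pyGetD backward_order (i - num_warmup_microbatches) 0]) order
  if num_warmup_microbatches > 0 then
    order ++ PySem.List.slice backward_order (some (-num_warmup_microbatches)) none
  else order

-- ===== PORT B =====
-- `pending.pop(0)` is ported as headD/tail: pending has just been appended to, so it is
-- nonempty wherever the pop runs and pop(0) is exactly (head, tail).
def convert_schedule_table_to_order_alt (num_warmup_microbatches : Int) (num_model_chunks : Int) (schedule_table : List (Int × Int)) : List Int :=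
  let s := schedule_table.foldl
    (fun (s : List Int × List Int) p =>
      let order := s.1 ++ [p.2 + 1]
      let pending := s.2 ++ [p.2 - num_model_chunks]
      if ((pending.length : Int) > num_warmup_microbatches) then
        (order ++ [pending.headD 0], pending.tail)
      else (order, pending))
    ([], [])
  s.1 ++ s.2

-- ===== PRECONDITION & SPEC =====
-- A raises ValueError on an empty schedule_table (zip of nothing) and IndexError for a
-- negative num_warmup_microbatches (the backward index runs past the end); Pre_ excludes
-- exactly those inputs.
def Pre_convert_schedule_table_to_order (num_warmup_microbatches : Int) (num_model_chunks : Int) (schedule_table : List (Int × Int)) : Prop :=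
  schedule_table ≠ [] ∧ 0 ≤ num_warmup_microbatches
instance (num_warmup_microbatches : Int) (num_model_chunks : Int) (schedule_table : List (Int × Int)) : Decidable (Pre_convert_schedule_table_to_order num_warmup_microbatches num_model_chunks schedule_table) := by unfold Pre_convert_schedule_table_to_order; infer_instance

def pvWitness_convert_schedule_table_to_order : Int × Int × (List (Int × Int)) := (2, 2, [(0, 0), (1, 0), (0, 1), (1, 1)])

def Spec_convert_schedule_table_to_order (num_warmup_microbatches : Int) (num_model_chunks : Int) (schedule_table : List (Int × Int)) (out : List Int) : Prop := out = convert_schedule_table_to_order_alt num_warmup_microbatches num_model_chunks schedule_table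
instance (num_warmup_microbatches : Int) (num_model_chunks : Int) (schedule_table : List (Int × Int)) (out : List Int) : Decidable (Spec_convert_schedule_table_to_order num_warmup_microbatches num_model_chunks schedule_table out) := by unfold Spec_convert_schedule_table_to_order; infer_instance

-- ===== CLAIM (what is proved, stated in full; the proofs are below) =====
def Claim_equal_convert_schedule_table_to_order : Prop := ∀ (num_warmup_microbatches : Int) (num_model_chunks : Int) (schedule_table : List (Int × Int)), Dom_convert_schedule_table_to_order num_warmup_microbatches num_model_chunks schedule_table → Pre_convert_schedule_table_to_order num_warmup_microbatches num_model_chunks schedule_table → Spec_convert_schedule_table_to_order num_warmup_microbatches num_model_chunks schedule_table (convert_schedule_table_to_order num_warmup_microbatches num_model_chunks schedule_table)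

-- ===== LEMMAS AND PROOFS =====

-- head of a drop is getD
theorem pv_headD_drop (l : List Int) (i : Nat) (d : Int) : (l.drop i).headD d = l.getD i d := by
  rw [List.headD_eq_head?_getD, List.head?_drop, List.getD_eq_getElem?_getD]

-- the delay-line fold's invariant: after consuming p, the emitted order is the warmup
-- prefix plus the interleaved steady state, and the queue holds the trailing backwards
theorem pv_loop (k : Nat) (m : Int) (p : List (Int × Int)) :
    p.foldl
      (fun (s : List Int × List Int) x =>
        let order := s.1 ++ [x.2 + 1]
        let pending := s.2 ++ [x.2 - m]
        if ((pending.length : Int) > (k : Int)) then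
          (order ++ [pending.headD 0], pending.tail)
        else (order, pending))
      ([], [])
    = ((p.map (fun x => x.2 + 1)).take k
        ++ (List.range (p.length - k)).flatMap
            (fun j => [(p.map (fun x => x.2 + 1)).getD (k + j) 0,
                       (p.map (fun x => x.2 - m)).getD j 0]),
       (p.map (fun x => x.2 - m)).drop (p.length - k)) := by
  induction p using List.reverseRecOn with
  | nil => simp
  | append_singleton l x ih =>
    rw [List.foldl_append, ih]
    simp only [List.foldl_cons, List.foldl_nil]
    set u := l.map (fun x : Int × Int => x.2 + 1) with hu
    set v := l.map (fun x : Int × Int => x.2 - m) with hv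
    have hlu : u.length = l.length := by simp [hu]
    have hlv : v.length = l.length := by simp [hv]
    set n := l.length with hn
    have hmu : (l ++ [x]).map (fun x : Int × Int => x.2 + 1) = u ++ [x.2 + 1] := by simp [hu]
    have hmv : (l ++ [x]).map (fun x : Int × Int => x.2 - m) = v ++ [x.2 - m] := by simp [hv]
    rw [hmu, hmv]
    simp only [List.length_append, List.length_cons, List.length_nil]
    by_cases hk : k ≤ n
    · rw [if_pos (by simp [hlv]; omega)]
      have hdrop : v.drop (n - k) ++ [x.2 - m] = (v ++ [x.2 - m]).drop (n - k) := by
        rw [List.drop_append_of_le_length (by omega)]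
      rw [hdrop, pv_headD_drop, List.tail_drop]
      have hr : n + 1 - k = (n - k) + 1 := by omega
      have hflat : (List.range (n + 1 - k)).flatMap
          (fun j => [(u ++ [x.2 + 1]).getD (k + j) 0, (v ++ [x.2 - m]).getD j 0])
          = (List.range (n - k)).flatMap (fun j => [u.getD (k + j) 0, v.getD j 0])
            ++ [x.2 + 1, (v ++ [x.2 - m]).getD (n - k) 0] := by
        rw [hr, List.range_succ, List.flatMap_append]
        congr 1
        · apply List.flatMap_congr
          intro j hj
          simp only [List.mem_range] at hj
          simp only [List.getD_eq_getElem?_getD]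
          rw [List.getElem?_append_left (by omega), List.getElem?_append_left (by omega)]
        · simp only [List.flatMap_cons, List.flatMap_nil, List.append_nil]
          rw [show k + (n - k) = n from by omega]
          rw [show (u ++ [x.2 + 1]).getD n 0 = x.2 + 1 from by
            rw [List.getD_eq_getElem _ _ (by simp [hlu])]
            rw [List.getElem_append_right (by omega)]
            simp [hlu]]
      rw [hflat, List.take_append_of_le_length (by omega)]
      rw [show n + 1 - k = n - k + 1 from by omega]
      simp [List.append_assoc]
    · rw [if_neg (by simp [hlv]; omega)]
      rw [show n - k = 0 from by omega, show n + 1 - k = 0 from by omega]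
      simp only [List.range_zero, List.flatMap_nil, List.drop_zero, List.append_nil]
      rw [List.take_of_length_le (by omega), List.take_of_length_le (by simp [hlu]; omega)]

-- port A in canonical prefix/interleave/suffix form
theorem pv_A_eq (k : Nat) (m : Int) (st : List (Int × Int)) :
    convert_schedule_table_to_order (k : Int) m st =
      (st.map (fun p => p.2 + 1)).take k
      ++ (List.range (st.length - k)).flatMap
          (fun j => [(st.map (fun p => p.2 + 1)).getD (k + j) 0, (st.map (fun p => p.2 - m)).getD j 0])
      ++ (st.map (fun p => p.2 - m)).drop (st.length - k) := by
  set F := (st.map (·.2)).map (fun c => c + 1) with hF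
  set Bk := (st.map (·.2)).map (fun c => c - m) with hBk
  have hFst : F = st.map (fun p => p.2 + 1) := by simp [hF, List.map_map]
  have hBst : Bk = st.map (fun p => p.2 - m) := by simp [hBk, List.map_map]
  have hlF : F.length = st.length := by simp [hF]
  have hlB : Bk.length = st.length := by simp [hBk]
  simp only [convert_schedule_table_to_order]
  rw [PySem.List.slice_to_natCast]
  have hbody : (fun (acc : List Int) (i : Int) => acc ++ [PySem.List.pyGetD F i 0]
      ++ [PySem.List.pyGetD Bk (i - (k : Int)) 0])
      = fun acc i => acc ++ ([PySem.List.pyGetD F i 0, PySem.List.pyGetD Bk (i - (k : Int)) 0]) := by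
    funext acc i; simp
  rw [hbody, PySem.List.foldl_append_eq_flatMap]
  rw [PySem.List.pyRange_one]
  have htn : (((F.length : Int)) - (k : Int)).toNat = st.length - k := by omega
  rw [htn]
  rw [List.flatMap_map]
  have hmid : ∀ j ∈ List.range (st.length - k),
      [PySem.List.pyGetD F ((k : Int) + (j : Int)) 0, PySem.List.pyGetD Bk ((k : Int) + (j : Int) - (k : Int)) 0]
      = [F.getD (k + j) 0, Bk.getD j 0] := by
    intro j hj
    have : (k : Int) + (j : Int) - (k : Int) = (j : Int) := by ring
    rw [this, show (k : Int) + (j : Int) = ((k + j : Nat) : Int) from by push_cast; ring,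
       PySem.List.pyGetD_natCast, PySem.List.pyGetD_natCast]
  rw [List.flatMap_congr hmid]
  rw [hFst, hBst]
  by_cases hk : 0 < k
  · rw [if_pos (show (0:Int) < (k:Int) by exact_mod_cast hk)]
    rw [PySem.List.slice_from_neg_natCast Bk k hk, hlB, hBst]
    simp [List.map_map, Function.comp_def]
  · have hk0 : k = 0 := by omega
    subst hk0
    rw [if_neg (by norm_num)]
    simp

-- port B in the same canonical form, via the delay-line invariant
theorem pv_B_eq (k : Nat) (m : Int) (st : List (Int × Int)) :
    convert_schedule_table_to_order_alt (k : Int) m st =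
      (st.map (fun p => p.2 + 1)).take k
      ++ (List.range (st.length - k)).flatMap
          (fun j => [(st.map (fun p => p.2 + 1)).getD (k + j) 0, (st.map (fun p => p.2 - m)).getD j 0])
      ++ (st.map (fun p => p.2 - m)).drop (st.length - k) := by
  simp only [convert_schedule_table_to_order_alt]
  rw [pv_loop k m st]

-- ===== VERDICT (by name: the statement is the Claim_ definition above) =====
theorem convert_schedule_table_to_order_spec : Claim_equal_convert_schedule_table_to_order := by
  intro w m st _ hpre
  obtain ⟨hne, hw⟩ := hpre
  unfold Spec_convert_schedule_table_to_order
  obtain ⟨k, rfl⟩ : ∃ k : Nat, w = (k : Int) := ⟨w.toNat, by omega⟩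
  rw [pv_A_eq, pv_B_eq]
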